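-- pv_equiv track=rewrite | github.com/juyongc/Up-Algorithms | PROG_모음사전.py | solution
-- ===== SOURCE A (Python) =====
-- def solution(word):
--     answer = 0
--     alpha = {'A':0,'E':1,'I':2,'O':3,'U':4}
--     for i in range(len(word)):
--         if word[i] == 'A':
--             answer += 1
--         else:
--             now = alpha[word[i]]
--             for j in range(4,i,-1):
--                 answer += now*(5**(j-i))
--             answer += now + 1
--     return answer
-- ===== SOURCE B (Python) =====
-- def solution(word):
--     alpha = {'A': 0, 'E': 1, 'I': 2, 'O': 3, 'U': 4}
--     dp = [781, 156, 31, 6, 1]  # dp[i] = 1 + 5 + 25 + ... + 5**(4-i)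
--     return sum(alpha[c] * (dp[i] if i < 5 else 1) + 1 for i, c in enumerate(word))
-- ===== Notes on version B (the rewrite author's own statement) =====
-- stated objective: simpler
-- what changed: Replaces A's inner geometric-series loop (for j in range(4,i,-1)) with a precomputed multiplier table dp=[781,156,31,6,1], turning the nested loops into one flat sum over enumerate(word).
import Mathlib
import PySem

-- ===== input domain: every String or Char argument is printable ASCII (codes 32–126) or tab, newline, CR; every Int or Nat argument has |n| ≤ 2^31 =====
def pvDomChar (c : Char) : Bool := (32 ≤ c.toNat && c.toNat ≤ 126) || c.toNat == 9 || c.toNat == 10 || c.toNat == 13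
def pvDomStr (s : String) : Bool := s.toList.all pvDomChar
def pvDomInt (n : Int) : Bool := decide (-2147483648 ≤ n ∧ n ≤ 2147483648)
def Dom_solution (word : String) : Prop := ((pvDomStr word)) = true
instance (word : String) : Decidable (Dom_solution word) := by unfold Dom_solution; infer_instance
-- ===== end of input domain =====

-- B replaces A's inner geometric-series loop with a precomputed multiplier table; same O(n), simpler.

-- ===== PORT A =====
def solution (word : String) : Int :=
  let alpha : PySem.Dict Char Int :=
    PySem.Dict.ofList [('A', 0), ('E', 1), ('I', 2), ('O', 3), ('U', 4)]
  (PySem.List.enumerate word.toList).foldl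
    (fun answer ic =>
      if ic.2 = 'A' then answer + 1
      else
        -- alpha[word[i]]: KeyError on a non-vowel char is excluded by Pre_solution
        let now := (alpha.get? ic.2).getD 0
        let answer :=
          (PySem.List.pyRange 4 ic.1 (-1)).foldl
            (fun a j => a + now * (5 : Int) ^ (j - ic.1).toNat) answer
        answer + now + 1)
    0

-- ===== PORT B =====
def solution_alt (word : String) : Int :=
  let alpha : PySem.Dict Char Int :=
    PySem.Dict.ofList [('A', 0), ('E', 1), ('I', 2), ('O', 3), ('U', 4)]
  let dp : List Int := [781, 156, 31, 6, 1]
  ((PySem.List.enumerate word.toList).map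
    (fun ic =>
      (alpha.get? ic.2).getD 0 * (if ic.1 < 5 then PySem.List.pyGetD dp ic.1 0 else 1) + 1)).sum

-- ===== PRECONDITION & SPEC =====
-- Pre_ admits exactly the words on which Python A returns: every character is a vowel
-- (on any other character A's dict lookup raises KeyError, and so does B's).
def Pre_solution (word : String) : Prop :=
  (word.toList.all (fun c => c ∈ ['A', 'E', 'I', 'O', 'U'])) = true
instance (word : String) : Decidable (Pre_solution word) := by unfold Pre_solution; infer_instance
def pvWitness_solution : String := "AEIOUA"
def Spec_solution (word : String) (out : Int) : Prop := out = solution_alt word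
instance (word : String) (out : Int) : Decidable (Spec_solution word out) := by unfold Spec_solution; infer_instance

-- ===== CLAIM (what is proved, stated in full; the proofs are below) =====
def Claim_equal_solution : Prop :=
  ∀ (word : String), Dom_solution word → Pre_solution word → Spec_solution word (solution word)

-- ===== LEMMAS AND PROOFS =====

-- A's per-character step (inner loop plus `now + 1`) equals B's table formula.
lemma pv_inner (i : Int) (hi : 0 ≤ i) (now a : Int) :
    ((PySem.List.pyRange 4 i (-1)).foldl
        (fun x j => x + now * (5 : Int) ^ (j - i).toNat) a) + now + 1
      = a + now * (if i < 5 then PySem.List.pyGetD [781, 156, 31, 6, 1] i 0 else 1) + 1 := by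
  have h : i = 0 ∨ i = 1 ∨ i = 2 ∨ i = 3 ∨ i = 4 ∨ 5 ≤ i := by omega
  rcases h with h | h | h | h | h | h
  · subst h
    rw [show PySem.List.pyRange 4 0 (-1) = [(4:Int), 3, 2, 1] from by decide,
      if_pos (by omega : (0:Int) < 5)]
    norm_num [PySem.List.pyGetD, PySem.List.pyIdx?, PySem.List.pyGet?, List.foldl, Int.toNat]
    ring
  · subst h
    rw [show PySem.List.pyRange 4 1 (-1) = [(4:Int), 3, 2] from by decide,
      if_pos (by omega : (1:Int) < 5)]
    norm_num [PySem.List.pyGetD, PySem.List.pyIdx?, PySem.List.pyGet?, List.foldl, Int.toNat]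
    ring
  · subst h
    rw [show PySem.List.pyRange 4 2 (-1) = [(4:Int), 3] from by decide,
      if_pos (by omega : (2:Int) < 5)]
    norm_num [PySem.List.pyGetD, PySem.List.pyIdx?, PySem.List.pyGet?, List.foldl, Int.toNat]
    ring
  · subst h
    rw [show PySem.List.pyRange 4 3 (-1) = [(4:Int)] from by decide,
      if_pos (by omega : (3:Int) < 5)]
    norm_num [PySem.List.pyGetD, PySem.List.pyIdx?, PySem.List.pyGet?, List.foldl, Int.toNat]
    ring
  · subst h
    rw [show PySem.List.pyRange 4 4 (-1) = ([] : List Int) from by decide,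
      if_pos (by omega : (4:Int) < 5)]
    norm_num [PySem.List.pyGetD, PySem.List.pyIdx?, PySem.List.pyGet?, List.foldl, Int.toNat]
  · rw [PySem.List.pyRange_neg_one_eq_nil (by omega), if_neg (by omega : ¬ i < 5)]
    simp only [List.foldl_nil]
    ring

lemma pv_main (cs : List Char) (s : Int) (hs : 0 ≤ s) (acc : Int) :
    (PySem.List.enumerate cs s).foldl
      (fun answer ic =>
        if ic.2 = 'A' then answer + 1
        else
          let now := ((PySem.Dict.ofList
            [('A', (0:Int)), ('E', 1), ('I', 2), ('O', 3), ('U', 4)]).get? ic.2).getD 0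
          let answer :=
            (PySem.List.pyRange 4 ic.1 (-1)).foldl
              (fun a j => a + now * (5 : Int) ^ (j - ic.1).toNat) answer
          answer + now + 1) acc
    = acc + ((PySem.List.enumerate cs s).map
        (fun ic =>
          ((PySem.Dict.ofList
            [('A', (0:Int)), ('E', 1), ('I', 2), ('O', 3), ('U', 4)]).get? ic.2).getD 0
            * (if ic.1 < 5 then PySem.List.pyGetD [781, 156, 31, 6, 1] ic.1 0 else 1) + 1)).sum := by
  induction cs generalizing s acc with
  | nil => simp [PySem.List.enumerate]
  | cons c cs ih =>
    rw [PySem.List.enumerate_cons, List.foldl_cons, List.map_cons, List.sum_cons,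
      ih (s + 1) (by omega)]
    by_cases hc : c = 'A'
    · subst hc
      have hA : ((PySem.Dict.ofList
          [('A', (0:Int)), ('E', 1), ('I', 2), ('O', 3), ('U', 4)]).get? 'A').getD 0 = 0 := by rfl
      simp [hA]
      ring
    · simp only [if_neg hc]
      rw [pv_inner s hs]
      ring

-- ===== VERDICT (by name: the statement is the Claim_ definition above) =====
theorem solution_spec : Claim_equal_solution := by
  intro word _ _
  show solution word = solution_alt word
  unfold solution solution_alt
  simpa using pv_main word.toList 0 le_rfl 0
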